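-- pv_equiv track=rewrite | github.com/Toru1968/mahjong-performance-analysis | 最終手牌生成.py | parse_tile_list_string
-- ===== SOURCE A (Python) =====
-- from typing import Dict, List, Tuple
-- from typing import List
-- from typing import Dict, List, Any
--
-- def parse_tile_list_string(tile_list_str: str) -> List[str]:
--     """
--     "1m2m3p0s" のように連結された牌の文字列を、['1m', '2m', '3p', '0s'] のようなリストに分割する。
--     """
--     if not isinstance(tile_list_str, str) or not tile_list_str:
--         return []
--
--     tiles, i = [], 0
--     while i < len(tile_list_str):
--         # 2文字で1つの牌を構成するかチェック
--         if i + 1 < len(tile_list_str):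
--             num_char, suit_char = tile_list_str[i], tile_list_str[i+1]
--             if (num_char.isdigit() or num_char == '0') and suit_char in ['m', 'p', 's', 'z']:
--                 tiles.append(num_char + suit_char)
--                 i += 2
--                 continue
--         # 牌として解釈できない場合は1文字進む
--         i += 1
--     return tiles
-- ===== SOURCE B (Python) =====
-- from typing import List
--
-- def parse_tile_list_string(tile_list_str: str) -> List[str]:
--     if not isinstance(tile_list_str, str):
--         return []
--     return [tile_list_str[i] + tile_list_str[i + 1]
--             for i in range(len(tile_list_str) - 1)
--             if (tile_list_str[i].isdigit() or tile_list_str[i] == '0')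
--             and tile_list_str[i + 1] in ('m', 'p', 's', 'z')]
-- ===== Notes on version B (the rewrite author's own statement) =====
-- stated objective: simpler
-- what changed: Replaces A's manual pointer loop with its conditional +2/+1 skips by a single uniform comprehension over all adjacent index pairs, relying on the fact that valid (digit,suit) pairs can never overlap (a suit letter is never a digit).
import Mathlib
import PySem

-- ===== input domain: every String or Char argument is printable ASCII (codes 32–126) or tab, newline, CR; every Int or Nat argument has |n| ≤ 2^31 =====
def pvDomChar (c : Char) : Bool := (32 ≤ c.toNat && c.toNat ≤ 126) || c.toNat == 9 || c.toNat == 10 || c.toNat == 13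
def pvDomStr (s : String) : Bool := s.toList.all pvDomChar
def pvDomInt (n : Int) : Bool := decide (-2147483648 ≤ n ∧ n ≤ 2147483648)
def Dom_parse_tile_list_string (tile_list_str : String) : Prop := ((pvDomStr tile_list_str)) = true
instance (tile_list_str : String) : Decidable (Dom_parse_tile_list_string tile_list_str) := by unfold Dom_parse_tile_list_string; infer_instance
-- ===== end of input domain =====

-- B replaces A's manual pointer with its +2/+1 skips by a uniform single pass over all
-- adjacent index pairs (valid pairs cannot overlap), for a simpler decomposition; same values.

-- ===== PORT A =====
-- while-loop of A: index i, skip 2 on a matched (digit,suit) pair, else skip 1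
def parseLoopA (cs : List Char) (i : Nat) : List String :=
  if _h : i < cs.length then
    if i + 1 < cs.length then
      let num_char := cs.getD i ' '
      let suit_char := cs.getD (i + 1) ' '
      if (PySem.Chars.isdigit num_char || num_char == '0')
          && decide (suit_char ∈ ['m', 'p', 's', 'z']) then
        String.ofList [num_char, suit_char] :: parseLoopA cs (i + 2)
      else
        parseLoopA cs (i + 1)
    else
      parseLoopA cs (i + 1)
  else
    []
termination_by cs.length - i
decreasing_by all_goals omega

def parse_tile_list_string (tile_list_str : String) : List String :=
  if tile_list_str = "" then []
  else parseLoopA tile_list_str.toList 0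

-- ===== PORT B =====
-- comprehension over range(len-1): keep every adjacent (digit,suit) pair
def parse_tile_list_string_alt (tile_list_str : String) : List String :=
  let cs := tile_list_str.toList
  (List.range (cs.length - 1)).filterMap (fun i =>
    if (PySem.Chars.isdigit (cs.getD i ' ') || cs.getD i ' ' == '0')
        && decide (cs.getD (i + 1) ' ' ∈ ['m', 'p', 's', 'z']) then
      some (String.ofList [cs.getD i ' ', cs.getD (i + 1) ' '])
    else
      none)

-- ===== PRECONDITION & SPEC =====
def Spec_parse_tile_list_string (tile_list_str : String) (out : List String) : Prop := out = parse_tile_list_string_alt tile_list_str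
instance (tile_list_str : String) (out : List String) : Decidable (Spec_parse_tile_list_string tile_list_str out) := by unfold Spec_parse_tile_list_string; infer_instance

-- ===== CLAIM (what is proved, stated in full; the proofs are below) =====
def Claim_equal_parse_tile_list_string : Prop := ∀ (tile_list_str : String), Dom_parse_tile_list_string tile_list_str → Spec_parse_tile_list_string tile_list_str (parse_tile_list_string tile_list_str)

-- ===== LEMMAS AND PROOFS =====

-- B's per-index test/emit function, factored out for the proof
def pairF (cs : List Char) (i : Nat) : Option String :=
  if (PySem.Chars.isdigit (cs.getD i ' ') || cs.getD i ' ' == '0')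
      && decide (cs.getD (i + 1) ' ' ∈ ['m', 'p', 's', 'z']) then
    some (String.ofList [cs.getD i ' ', cs.getD (i + 1) ' '])
  else
    none

-- non-overlap: a matched pair ends in a suit letter, which can never start a pair
theorem pairF_succ_none (cs : List Char) (i : Nat)
    (h : pairF cs i ≠ none) : pairF cs (i + 1) = none := by
  unfold pairF at h ⊢
  split at h
  case isTrue hc =>
    have hsuit := (Bool.and_eq_true_iff.mp hc).2
    rw [decide_eq_true_iff] at hsuit
    have h1 : cs.getD (i + 1) ' ' = 'm' ∨ cs.getD (i + 1) ' ' = 'p' ∨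
        cs.getD (i + 1) ' ' = 's' ∨ cs.getD (i + 1) ' ' = 'z' := by simpa using hsuit
    rcases h1 with h1 | h1 | h1 | h1 <;>
      · rw [if_neg]
        rw [h1]
        simp [PySem.Chars.isdigit]
  case isFalse => simp at h

theorem parseLoopA_eq_filterMap (cs : List Char) (i : Nat) :
    parseLoopA cs i = (List.range' i (cs.length - 1 - i)).filterMap (pairF cs) := by
  by_cases h : i < cs.length
  · rw [parseLoopA]
    simp only [h, dif_pos]
    by_cases h1 : i + 1 < cs.length
    · have hlen : cs.length - 1 - i = (cs.length - 1 - (i + 1)) + 1 := by omega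
      rw [hlen, List.range'_succ, List.filterMap_cons]
      simp only [h1, if_pos]
      rcases hfi : pairF cs i with _ | tok
      · unfold pairF at hfi
        split at hfi
        · exact absurd hfi (by simp)
        · rename_i hc
          rw [if_neg hc]
          rw [parseLoopA_eq_filterMap cs (i + 1)]
      · have hfn : pairF cs (i + 1) = none := pairF_succ_none cs i (by rw [hfi]; simp)
        unfold pairF at hfi
        split at hfi
        · rename_i hc
          rw [if_pos hc]
          have htok : tok = String.ofList [cs.getD i ' ', cs.getD (i + 1) ' '] := by
            exact (Option.some_inj.mp hfi).symm
          rw [htok]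
          rw [parseLoopA_eq_filterMap cs (i + 2)]
          congr 1
          by_cases h2 : cs.length - 1 - (i + 1) = 0
          · rw [h2]
            have : cs.length - 1 - (i + 2) = 0 := by omega
            simp [this]
          · have hlen2 : cs.length - 1 - (i + 1) = (cs.length - 1 - (i + 2)) + 1 := by omega
            rw [hlen2, List.range'_succ, List.filterMap_cons, hfn]
        · exact absurd hfi (by simp)
    · have hend : cs.length - 1 - i = 0 := by omega
      have hend1 : cs.length - 1 - (i + 1) = 0 := by omega
      rw [if_neg h1, parseLoopA_eq_filterMap cs (i + 1), hend, hend1]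
      simp
  · rw [parseLoopA]
    have : cs.length - 1 - i = 0 := by omega
    simp [h, this]
termination_by cs.length - i
decreasing_by all_goals omega

-- ===== VERDICT (by name: the statement is the Claim_ definition above) =====
theorem parse_tile_list_string_spec : Claim_equal_parse_tile_list_string := by
  intro s _
  unfold Spec_parse_tile_list_string parse_tile_list_string parse_tile_list_string_alt
  by_cases hs : s = ""
  · subst hs; simp
  · rw [if_neg hs, parseLoopA_eq_filterMap]
    simp only [pairF, List.range_eq_range', Nat.sub_zero]
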